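-- pv_equiv track=rewrite | github.com/asrarsyed/courses-tip | TIP101/W02/203.py | find_min_index_of_repeating
-- ===== SOURCE A (Python) =====
-- def find_min_index_of_repeating(nums: list[int]) -> int | None:
--     seen = {}
--     min_index = None
--
--     for i, val in enumerate(nums):
--         if val in seen:
--             # update minimum index of repeating element
--             min_index = seen[val] if min_index is None else min(min_index, seen[val])
--         else:
--             seen[val] = i
--
--     return min_index
-- ===== SOURCE B (Python) =====
-- def find_min_index_of_repeating(nums: list[int]) -> int | None:
--     counts = {}
--     for v in nums:
--         counts[v] = counts.get(v, 0) + 1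
--     for i, v in enumerate(nums):
--         if counts[v] > 1:
--             return i
--     return None
-- ===== Notes on version B (the rewrite author's own statement) =====
-- stated objective: idiomatic
-- what changed: Replaced A's single pass that maintains a first-index dict plus a running minimum with the standard count-table-then-scan decomposition: one pass builds a frequency table, a second pass with enumerate short-circuits at the first index whose value occurs more than once.
import Mathlib
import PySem

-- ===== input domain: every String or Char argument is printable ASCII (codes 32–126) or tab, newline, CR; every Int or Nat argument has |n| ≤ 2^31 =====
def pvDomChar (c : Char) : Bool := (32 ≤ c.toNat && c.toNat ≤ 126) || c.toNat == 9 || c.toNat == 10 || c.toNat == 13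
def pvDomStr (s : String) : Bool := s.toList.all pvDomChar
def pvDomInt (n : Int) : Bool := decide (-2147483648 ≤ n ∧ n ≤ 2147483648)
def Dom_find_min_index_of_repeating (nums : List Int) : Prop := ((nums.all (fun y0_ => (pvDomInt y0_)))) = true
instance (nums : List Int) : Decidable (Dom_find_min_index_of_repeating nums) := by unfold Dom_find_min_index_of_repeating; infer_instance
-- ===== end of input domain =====

-- B replaces A's single-pass first-index-dict + running-minimum with an idiomatic
-- count-table-then-scan decomposition; same return value, same O(n) cost.


-- ===== PORT A =====
-- one loop step of A: (seen, min_index) updated at (i, val)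
def aStep (st : PySem.Dict Int Int × Option Int) (p : Int × Int) :
    PySem.Dict Int Int × Option Int :=
  match st.1.get? p.2 with
  | some j => (st.1, some (match st.2 with | none => j | some m => min m j))
  | none => (st.1.insert p.2 p.1, st.2)

def find_min_index_of_repeating (nums : List Int) : Option Int :=
  ((PySem.List.enumerate nums 0).foldl aStep (PySem.Dict.empty, none)).2

-- ===== PORT B =====
-- B's second loop: first index i with counts[nums[i]] > 1, else None
def bScan (counts : PySem.Dict Int Int) : List (Int × Int) → Option Int
  | [] => none
  | (i, v) :: rest => if counts.getD v 0 > 1 then some i else bScan counts rest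

def find_min_index_of_repeating_alt (nums : List Int) : Option Int :=
  let counts := nums.foldl (fun d v => d.insert v (d.getD v 0 + 1)) PySem.Dict.empty
  bScan counts (PySem.List.enumerate nums 0)

-- ===== PRECONDITION & SPEC =====
def Spec_find_min_index_of_repeating (nums : List Int) (out : Option Int) : Prop := out = find_min_index_of_repeating_alt nums
instance (nums : List Int) (out : Option Int) : Decidable (Spec_find_min_index_of_repeating nums out) := by unfold Spec_find_min_index_of_repeating; infer_instance

-- ===== CLAIM (what is proved, stated in full; the proofs are below) =====
def Claim_equal_find_min_index_of_repeating : Prop := ∀ (nums : List Int), Dom_find_min_index_of_repeating nums → Spec_find_min_index_of_repeating nums (find_min_index_of_repeating nums)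

-- ===== LEMMAS AND PROOFS =====

-- minimum of two optional ints (none = "no value yet"); the combine operation of A's loop
def optMin : Option Int → Option Int → Option Int
  | none, b => b
  | some m, none => some m
  | some m, some j => some (min m j)

theorem optMin_left_comm (a b c : Option Int) :
    optMin a (optMin b c) = optMin b (optMin a c) := by
  cases a <;> cases b <;> cases c <;> simp [optMin, min_comm, min_left_comm]

theorem optMin_assoc (a b c : Option Int) :
    optMin (optMin a b) c = optMin a (optMin b c) := by
  cases a <;> cases b <;> cases c <;> simp [optMin, min_assoc]

theorem optMin_absorb {m a : Int} (x : Option Int) (h : m ≤ a) :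
    optMin (some m) (optMin (some a) x) = optMin (some m) x := by
  cases x <;> simp [optMin] <;> omega

-- contributions of A's loop restated as a structural recursion over (value, index) stream
def gA (d : PySem.Dict Int Int) : List Int → Int → Option Int
  | [], _ => none
  | v :: xs, s =>
    match d.get? v with
    | some j => optMin (some j) (gA d xs (s + 1))
    | none => gA (d.insert v s) xs (s + 1)

theorem foldA_eq_gA (xs : List Int) :
    ∀ (s : Int) (d : PySem.Dict Int Int) (mi : Option Int),
    ((PySem.List.enumerate xs s).foldl aStep (d, mi)).2 = optMin mi (gA d xs s) := by
  induction xs with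
  | nil => intro s d mi; rw [PySem.List.enumerate_nil]; cases mi <;> rfl
  | cons v xs ih =>
    intro s d mi
    rw [PySem.List.enumerate_cons]
    simp only [List.foldl_cons, gA]
    cases h : d.get? v with
    | some j =>
      simp only [aStep, h]
      rw [ih (s + 1) d _]
      have hup : (some (match mi with | none => j | some m => min m j) : Option Int)
          = optMin mi (some j) := by cases mi <;> rfl
      rw [hup, optMin_assoc]
    | none => simp only [aStep, h, ih]

theorem gA_congr (xs : List Int) :
    ∀ (s : Int) (d₁ d₂ : PySem.Dict Int Int),
    (∀ k, d₁.get? k = d₂.get? k) → gA d₁ xs s = gA d₂ xs s := by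
  induction xs with
  | nil => intro _ _ _ _; rfl
  | cons v xs ih =>
    intro s d₁ d₂ h
    simp only [gA, h v]
    cases h2 : d₂.get? v with
    | some j => rw [ih _ _ _ h]
    | none =>
      apply ih
      intro k
      by_cases hk : k = v
      · subst hk; rw [PySem.Dict.get?_insert_self, PySem.Dict.get?_insert_self]
      · rw [PySem.Dict.get?_insert_of_ne _ _ hk, PySem.Dict.get?_insert_of_ne _ _ hk]
        exact h k

-- under an outer min bound m, the index stored for v does not matter
theorem gA_valSwap (xs : List Int) (v : Int) :
    ∀ (t m a b : Int) (d : PySem.Dict Int Int), m ≤ a → m ≤ b →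
    optMin (some m) (gA (d.insert v a) xs t) = optMin (some m) (gA (d.insert v b) xs t) := by
  induction xs with
  | nil => intro _ _ _ _ _ _ _; rfl
  | cons w xs ih =>
    intro t m a b d ha hb
    by_cases hw : w = v
    · subst hw
      simp only [gA, PySem.Dict.get?_insert_self]
      rw [optMin_absorb _ ha, optMin_absorb _ hb]
      exact ih (t + 1) m a b d ha hb
    · simp only [gA, PySem.Dict.get?_insert_of_ne _ _ hw]
      cases h : d.get? w with
      | some j =>
        simp only
        rw [optMin_left_comm (some m) (some j),
            optMin_left_comm (some m) (some j) (gA (d.insert v b) xs (t + 1))]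
        congr 1
        exact ih (t + 1) m a b d ha hb
      | none =>
        simp only
        have hne : v ≠ w := fun h' => hw h'.symm
        rw [gA_congr xs (t + 1) ((d.insert v a).insert w t) ((d.insert w t).insert v a)
              (PySem.Dict.get?_insert_insert_comm d a t hne),
            gA_congr xs (t + 1) ((d.insert v b).insert w t) ((d.insert w t).insert v b)
              (PySem.Dict.get?_insert_insert_comm d b t hne)]
        exact ih (t + 1) m a b (d.insert w t) ha hb

theorem gA_insert (xs : List Int) :
    ∀ (s s0 : Int) (v : Int) (d : PySem.Dict Int Int), d.get? v = none → s0 ≤ s →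
    gA (d.insert v s0) xs s =
      if v ∈ xs then optMin (some s0) (gA d xs s) else gA d xs s := by
  induction xs with
  | nil => intro _ _ _ _ _ _; rfl
  | cons w xs ih =>
    intro s s0 v d hv hs
    by_cases hw : w = v
    · subst hw
      rw [if_pos (List.mem_cons_self)]
      simp only [gA, PySem.Dict.get?_insert_self, hv]
      exact gA_valSwap xs w (s + 1) s0 s0 s d le_rfl hs
    · have hne : v ≠ w := fun h' => hw h'.symm
      simp only [gA, PySem.Dict.get?_insert_of_ne _ _ hw]
      cases h : d.get? w with
      | some j =>
        simp only
        rw [ih (s + 1) s0 v d hv (by omega)]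
        by_cases hmem : v ∈ xs
        · rw [if_pos hmem, if_pos (List.mem_cons_of_mem w hmem)]
          exact optMin_left_comm (some j) (some s0) _
        · rw [if_neg hmem, if_neg (by simp [hne, hmem])]
      | none =>
        simp only
        rw [gA_congr xs (s + 1) ((d.insert v s0).insert w s) ((d.insert w s).insert v s0)
              (PySem.Dict.get?_insert_insert_comm d s0 s hne)]
        rw [ih (s + 1) s0 v (d.insert w s)
              (by rw [PySem.Dict.get?_insert_of_ne _ _ hne]; exact hv)
              (by omega)]
        by_cases hmem : v ∈ xs
        · rw [if_pos hmem, if_pos (List.mem_cons_of_mem w hmem)]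
        · rw [if_neg hmem, if_neg (by simp [hne, hmem])]

-- the common reference: first position (counted from s) whose value recurs later
def rRef : List Int → Int → Option Int
  | [], _ => none
  | v :: xs, s => if v ∈ xs then some s else rRef xs (s + 1)

theorem rRef_lower (xs : List Int) :
    ∀ (t j : Int), rRef xs t = some j → t ≤ j := by
  induction xs with
  | nil => intro t j h; simp [rRef] at h
  | cons v xs ih =>
    intro t j h
    simp only [rRef] at h
    split_ifs at h with hmem
    · injection h with h; omega
    · have := ih (t + 1) j h; omega

theorem gA_empty (xs : List Int) :
    ∀ (s : Int), gA PySem.Dict.empty xs s = rRef xs s := by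
  induction xs with
  | nil => intro _; rfl
  | cons v xs ih =>
    intro s
    have hemp : (PySem.Dict.empty : PySem.Dict Int Int).get? v = none := rfl
    simp only [gA, hemp]
    rw [gA_insert xs (s + 1) s v PySem.Dict.empty hemp (by omega), ih (s + 1)]
    simp only [rRef]
    by_cases hmem : v ∈ xs
    · rw [if_pos hmem, if_pos hmem]
      cases h : rRef xs (s + 1) with
      | none => rfl
      | some j =>
        have := rRef_lower xs (s + 1) j h
        simp only [optMin]
        congr 1
        omega
    · rw [if_neg hmem, if_neg hmem]

-- B's scan, with counts over `full`, as a structural recursion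
def hRef (full : List Int) : List Int → Int → Option Int
  | [], _ => none
  | v :: xs, s => if 1 < full.count v then some s else hRef full xs (s + 1)

theorem bScan_eq_hRef (full : List Int) (xs : List Int) :
    ∀ (s : Int),
    bScan (PySem.Dict.counter full) (PySem.List.enumerate xs s) = hRef full xs s := by
  induction xs with
  | nil => intro _; rfl
  | cons v xs ih =>
    intro s
    rw [PySem.List.enumerate_cons]
    simp only [bScan, hRef, PySem.Dict.getD_counter]
    split_ifs with h h2 h2
    · rfl
    · omega
    · omega
    · exact ih (s + 1)

theorem hRef_congr (xs : List Int) :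
    ∀ (s : Int) (f₁ f₂ : List Int),
    (∀ w ∈ xs, f₁.count w = f₂.count w) → hRef f₁ xs s = hRef f₂ xs s := by
  induction xs with
  | nil => intro _ _ _ _; rfl
  | cons v xs ih =>
    intro s f₁ f₂ h
    simp only [hRef, h v (by simp)]
    split_ifs with hc
    · rfl
    · exact ih (s + 1) f₁ f₂ (fun w hw => h w (by simp [hw]))

theorem hRef_self (xs : List Int) :
    ∀ (s : Int), hRef xs xs s = rRef xs s := by
  induction xs with
  | nil => intro _; rfl
  | cons v xs ih =>
    intro s
    simp only [hRef, rRef]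
    by_cases hmem : v ∈ xs
    · rw [if_pos (by have h1 := List.count_pos_iff.mpr hmem
                     have h2 : List.count v (v :: xs) = List.count v xs + 1 :=
                       List.count_cons_self
                     omega),
          if_pos hmem]
    · rw [if_neg (by have h1 := List.count_eq_zero.mpr hmem
                     have h2 : List.count v (v :: xs) = List.count v xs + 1 :=
                       List.count_cons_self
                     omega),
          if_neg hmem]
      rw [hRef_congr xs (s + 1) (v :: xs) xs
            (fun w hw => List.count_cons_of_ne (by rintro rfl; exact hmem hw)),
          ih (s + 1)]

-- ===== VERDICT (by name: the statement is the Claim_ definition above) =====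
theorem find_min_index_of_repeating_spec : Claim_equal_find_min_index_of_repeating := by
  intro nums _
  unfold Spec_find_min_index_of_repeating find_min_index_of_repeating find_min_index_of_repeating_alt
  rw [foldA_eq_gA nums 0 PySem.Dict.empty none]
  have hcounts : nums.foldl (fun d v => d.insert v (d.getD v 0 + 1)) PySem.Dict.empty
      = PySem.Dict.counter nums := PySem.Dict.foldl_insert_getD_add_one_eq_counter nums
  simp only [hcounts]
  rw [bScan_eq_hRef nums nums 0, hRef_self nums 0, ← gA_empty nums 0]
  rfl
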